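-- pv_equiv track=rewrite | github.com/joycevandersel/joycevandersel | Algorithms-in-bioinformatics/SSAHA_algorithm.py | create_m_list
-- ===== SOURCE A (Python) =====
-- def create_m_list(hash_table, query, k):
--     """ Creates a master list based on a query and the hash_table.
--
--     :param hash_table: dict; a hash table containing all occurrences of k-mers
--     {k-mer: [(sequence,position)].
--     :param query: str; A DNA sequence string.
--     :param k: int; k-mer length used to build the master list (must be the same
--                 as the k used to build the hash table).
--     :return: list of tuples; each tuple containing the index, shift and offset.
--     """
--     m_list = []
--     for i in range(len(query) - k + 1):
--         if query[i:i + k] in hash_table: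
--             hits = hash_table[query[i:i + k]]
--             [m_list.extend([(pos[0], pos[1] - i, pos[1])]) for pos in hits]
--     m_list.sort()
--     return m_list
-- ===== SOURCE B (Python) =====
-- def create_m_list(hash_table, query, k):
--     """Index-build-then-join rewrite: group query positions by k-mer once,
--     then join each group against the hash table."""
--     groups = {}
--     for i in range(len(query) - k + 1):
--         groups.setdefault(query[i:i + k], []).append(i)
--     m_list = []
--     for kmer, idxs in groups.items():
--         hits = hash_table.get(kmer)
--         if hits is not None:
--             for pos in hits:
--                 for i in idxs:
--                     m_list.append((pos[0], pos[1] - i, pos[1]))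
--     m_list.sort()
--     return m_list
-- ===== Notes on version B (the rewrite author's own statement) =====
-- stated objective: alternative
-- what changed: B groups query positions by k-mer into a dict in one pass and then joins each grouped k-mer once against the hash table (index-build-then-join), instead of A's per-position membership test plus lookup; the final sort makes the results identical.
import Mathlib
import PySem

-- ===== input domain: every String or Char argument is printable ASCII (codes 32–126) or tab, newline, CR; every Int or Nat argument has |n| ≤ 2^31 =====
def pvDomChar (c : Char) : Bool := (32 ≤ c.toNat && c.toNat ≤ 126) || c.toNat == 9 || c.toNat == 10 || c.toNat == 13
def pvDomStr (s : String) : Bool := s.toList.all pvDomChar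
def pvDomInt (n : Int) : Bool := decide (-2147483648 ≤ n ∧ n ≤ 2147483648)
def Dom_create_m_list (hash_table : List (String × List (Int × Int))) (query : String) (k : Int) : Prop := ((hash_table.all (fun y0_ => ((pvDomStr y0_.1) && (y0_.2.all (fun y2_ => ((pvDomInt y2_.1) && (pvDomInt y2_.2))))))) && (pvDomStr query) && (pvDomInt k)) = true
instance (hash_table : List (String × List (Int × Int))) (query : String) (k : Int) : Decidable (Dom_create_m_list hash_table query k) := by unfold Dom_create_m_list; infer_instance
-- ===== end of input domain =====

-- B builds a k-mer → query-positions index once and joins it against the hash table, instead of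
-- A's one hash lookup per query position (alternative decomposition; the final sort makes them agree).

-- Python sorts int 3-tuples lexicographically; '<' on Lean's plain product is pointwise, so both
-- ports sort with this lexicographic key (exact for list.sort() here).
def pvLexKey (t : Int × Int × Int) : Int ×ₗ Int ×ₗ Int := toLex (t.1, toLex (t.2.1, t.2.2))

-- ===== PORT A =====
def create_m_list (hash_table : List (String × List (Int × Int))) (query : String) (k : Int) : List (Int × Int × Int) :=
  let d := PySem.Dict.mk hash_table
  -- for i in range(len(query) - k + 1): if query[i:i+k] in hash_table: m_list.extend(…)
  let m_list := (PySem.List.pyRange 0 (PySem.Str.len query - k + 1)).foldl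
    (fun acc i =>
      if d.contains (PySem.Str.slice query (some i) (some (i + k))) then
        acc ++ (d.getD (PySem.Str.slice query (some i) (some (i + k))) []).map
          (fun pos => (pos.1, pos.2 - i, pos.2))
      else acc) []
  PySem.List.sorted m_list pvLexKey

-- ===== PORT B =====
def create_m_list_alt (hash_table : List (String × List (Int × Int))) (query : String) (k : Int) : List (Int × Int × Int) :=
  -- groups.setdefault(query[i:i+k], []).append(i)
  let groups := (PySem.List.pyRange 0 (PySem.Str.len query - k + 1)).foldl
    (fun g i => g.modify (PySem.Str.slice query (some i) (some (i + k))) [] (fun l => l ++ [i]))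
    (PySem.Dict.empty : PySem.Dict String (List Int))
  let d := PySem.Dict.mk hash_table
  -- for kmer, idxs in groups.items(): hits = hash_table.get(kmer); if hits is not None: …
  let m_list := groups.items.foldl
    (fun acc p =>
      match d.get? p.1 with
      | some hits => acc ++ hits.flatMap (fun pos => p.2.map (fun i => (pos.1, pos.2 - i, pos.2)))
      | none => acc) []
  PySem.List.sorted m_list pvLexKey

-- ===== PRECONDITION & SPEC =====
def Spec_create_m_list (hash_table : List (String × List (Int × Int))) (query : String) (k : Int) (out : List (Int × Int × Int)) : Prop := out = create_m_list_alt hash_table query k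
instance (hash_table : List (String × List (Int × Int))) (query : String) (k : Int) (out : List (Int × Int × Int)) : Decidable (Spec_create_m_list hash_table query k out) := by unfold Spec_create_m_list; infer_instance

-- ===== CLAIM (what is proved, stated in full; the proofs are below) =====
def Claim_equal_create_m_list : Prop := ∀ (hash_table : List (String × List (Int × Int))) (query : String) (k : Int), Dom_create_m_list hash_table query k → Spec_create_m_list hash_table query k (create_m_list hash_table query k)

-- ===== LEMMAS AND PROOFS =====

-- the lexicographic key is injective
theorem pvLexKey_injective : Function.Injective pvLexKey := by
  intro t u h
  have h' := toLex.injective h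
  rw [Prod.mk.injEq] at h'
  have h2 := toLex.injective h'.2
  rw [Prod.mk.injEq] at h2
  exact Prod.ext h'.1 (Prod.ext h2.1 h2.2)

-- a flatMap that conses one element per item, permuted into map ++ flatMap
theorem pv_flatMap_cons_perm {β γ : Type} (ys : List β) (q : β → γ) (r : β → List γ) :
    (ys.flatMap fun b => q b :: r b).Perm (ys.map q ++ ys.flatMap r) := by
  induction ys with
  | nil => simp
  | cons y ys ih =>
    simp only [List.flatMap_cons, List.map_cons, List.cons_append]
    refine List.Perm.cons _ ?_
    have h1 := List.Perm.append_left (r y) ih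
    have h2 : (r y ++ (ys.map q ++ ys.flatMap r)).Perm (ys.map q ++ (r y ++ ys.flatMap r)) := by
      rw [← List.append_assoc, ← List.append_assoc]
      exact List.Perm.append_right _ List.perm_append_comm
    exact h1.trans h2

-- transposing a product enumeration is a permutation
theorem pv_flatMap_swap_perm {α β γ : Type} (xs : List α) (ys : List β) (h : α → β → γ) :
    (xs.flatMap fun a => ys.map (h a)).Perm (ys.flatMap fun b => xs.map (fun a => h a b)) := by
  induction xs with
  | nil => simp
  | cons x xs ih =>
    simp only [List.flatMap_cons, List.map_cons]
    exact (List.Perm.append_left (ys.map (h x)) ih).trans (pv_flatMap_cons_perm ys (h x) _).symm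

-- contains agrees with get?
theorem pv_contains_eq_isSome {ν : Type} (d : PySem.Dict String ν) (s : String) :
    d.contains s = (d.get? s).isSome := by
  simp only [PySem.Dict.contains, PySem.Dict.get?, Option.isSome_map]
  rw [Bool.eq_iff_iff]
  simp [List.find?_isSome, List.any_eq_true]

theorem pv_upd {g : Int → String} (s : String) (i : Int) (hs : g i = s) :
    ∀ (l : List (String × List Int)), (l.map Prod.fst).Nodup →
    (∀ p ∈ l, ∀ j ∈ p.2, g j = p.1) →
    l.any (fun p => p.1 == s) = true →
    (∀ p' ∈ l.map (fun p => if p.1 == s then (s, (((List.find? (fun p => p.1 == s) l).map Prod.snd).getD []) ++ [i]) else p), ∀ j ∈ p'.2, g j = p'.1) ∧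
    ((l.map (fun p => if p.1 == s then (s, (((List.find? (fun p => p.1 == s) l).map Prod.snd).getD []) ++ [i]) else p)).flatMap (fun p => p.2)).Perm
      (l.flatMap (fun p => p.2) ++ [i]) := by
  intro l
  induction l with
  | nil => intro _ _ h; simp at h
  | cons p l ih =>
    intro hnd hg hany
    simp only [List.map_cons, List.nodup_cons] at hnd
    by_cases hp : (p.1 == s) = true
    · have hps : p.1 = s := eq_of_beq hp
      have hfind : List.find? (fun q => q.1 == s) (p :: l) = some p := by
        simp [hp]
      simp only [List.map_cons, hp, if_pos, hfind, Option.map_some, Option.getD_some]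
      have htail_id : ∀ q ∈ l,
          (if (q.1 == s) = true then ((s, p.2 ++ [i]) : String × List Int) else q) = q := by
        intro q hq
        have hmem : q.1 ∈ List.map Prod.fst l := List.mem_map_of_mem hq
        have : (q.1 == s) = false := by
          apply beq_eq_false_iff_ne.mpr
          intro hqs
          exact hnd.1 (by rw [hps, ← hqs]; exact hmem)
        simp [this]
      rw [List.map_congr_left htail_id, List.map_id']
      constructor
      · intro p' hp'
        rcases List.mem_cons.mp hp' with h | h
        · subst h
          intro j hj
          rcases List.mem_append.mp hj with hj | hj
          · exact (hg p List.mem_cons_self j hj).trans hps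
          · rw [List.mem_singleton] at hj; subst hj; exact hs
        · exact hg p' (List.mem_cons_of_mem _ h)
      · simp only [List.flatMap_cons]
        have e1 : ((p.2 ++ [i]) ++ l.flatMap (fun p => p.2)) = p.2 ++ ([i] ++ l.flatMap (fun p => p.2)) := by
          rw [List.append_assoc]
        have e2 : p.2 ++ (l.flatMap (fun p => p.2) ++ [i]) = (p.2 ++ l.flatMap (fun p => p.2)) ++ [i] := by
          rw [List.append_assoc]
        rw [e1, ← e2]
        exact List.Perm.append_left _ List.perm_append_comm
    · have hp' : (p.1 == s) = false := by simpa using hp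
      have hfind : List.find? (fun q => q.1 == s) (p :: l) = List.find? (fun q => q.1 == s) l := by
        simp [hp']
      have hany' : l.any (fun q => q.1 == s) = true := by
        simp only [List.any_cons, hp', Bool.false_or] at hany; exact hany
      obtain ⟨ih1, ih2⟩ := ih hnd.2 (fun q hq => hg q (List.mem_cons_of_mem _ hq)) hany'
      simp only [List.map_cons, hp', Bool.false_eq_true, if_false, hfind, List.flatMap_cons]
      constructor
      · intro p'' hp''
        rcases List.mem_cons.mp hp'' with h | h
        · exact h ▸ hg p List.mem_cons_self
        · exact ih1 p'' h
      · have e2 : p.2 ++ (l.flatMap (fun p => p.2) ++ [i]) = (p.2 ++ l.flatMap (fun p => p.2)) ++ [i] := by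
          rw [List.append_assoc]
        rw [← e2]
        exact List.Perm.append_left _ ih2

theorem pv_modify_step {g : Int → String} (d : PySem.Dict String (List Int)) (i : Int)
    (hnd : (d.items.map Prod.fst).Nodup)
    (hg : ∀ p ∈ d.items, ∀ j ∈ p.2, g j = p.1) :
    (((d.modify (g i) [] (fun l => l ++ [i])).items.map Prod.fst).Nodup) ∧
    (∀ p ∈ (d.modify (g i) [] (fun l => l ++ [i])).items, ∀ j ∈ p.2, g j = p.1) ∧
    ((d.modify (g i) [] (fun l => l ++ [i])).items.flatMap (fun p => p.2)).Perm
      (d.items.flatMap (fun p => p.2) ++ [i]) := by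
  by_cases hc : d.contains (g i) = true
  · simp only [PySem.Dict.modify, PySem.Dict.insert, hc, if_pos, PySem.Dict.getD,
      PySem.Dict.get?]
    have hany : d.items.any (fun p => p.1 == g i) = true := hc
    obtain ⟨h1, h2⟩ := pv_upd (g := g) (g i) i rfl d.items hnd hg hany
    refine ⟨?_, h1, ?_⟩
    · have : (List.map (fun p => if p.1 == g i then ((g i, (Option.map Prod.snd (List.find? (fun p => p.1 == g i) d.items)).getD [] ++ [i]) : String × List Int) else p) d.items).map Prod.fst = d.items.map Prod.fst := by
        rw [List.map_map]
        apply List.map_congr_left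
        intro p _
        by_cases hp : p.1 = g i
        · simp [hp]
        · simp [hp]
      rw [this]; exact hnd
    · exact h2
  · have hcf : d.items.any (fun p => p.1 == g i) = false := Bool.eq_false_iff.mpr hc
    have hfind : List.find? (fun p => p.1 == g i) d.items = none := by
      rw [List.find?_eq_none]
      intro x hx
      have := List.any_eq_false.mp hcf x hx
      simpa using this
    have hnotmem : (g i) ∉ d.items.map Prod.fst := by
      intro hmem
      rcases List.mem_map.mp hmem with ⟨q, hq, hq1⟩
      have := List.any_eq_false.mp hcf q hq
      rw [hq1] at this; simp at this
    simp only [PySem.Dict.modify, PySem.Dict.insert, PySem.Dict.contains, hcf,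
      Bool.false_eq_true, if_false, PySem.Dict.getD, PySem.Dict.get?, hfind,
      Option.map_none, Option.getD_none, List.nil_append]
    refine ⟨?_, ?_, ?_⟩
    · simp only [List.map_append, List.map_cons, List.map_nil]
      exact List.Nodup.append hnd (List.nodup_singleton _) (by simpa using hnotmem)
    · intro p hp
      rcases List.mem_append.mp hp with h | h
      · exact hg p h
      · rw [List.mem_singleton] at h; subst h
        intro j hj; rw [List.mem_singleton] at hj; subst hj; rfl
    · simp

-- folding the grouping step over a list of positions: keys stay nodup, values stay
-- key-consistent, and the flattened values are a permutation of the processed positions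
theorem pv_group_fold {g : Int → String} (R : List Int) :
    ∀ (d : PySem.Dict String (List Int)),
    (d.items.map Prod.fst).Nodup →
    (∀ p ∈ d.items, ∀ j ∈ p.2, g j = p.1) →
    (((R.foldl (fun d i => d.modify (g i) [] (fun l => l ++ [i])) d).items.map Prod.fst).Nodup) ∧
    (∀ p ∈ (R.foldl (fun d i => d.modify (g i) [] (fun l => l ++ [i])) d).items, ∀ j ∈ p.2, g j = p.1) ∧
    ((R.foldl (fun d i => d.modify (g i) [] (fun l => l ++ [i])) d).items.flatMap (fun p => p.2)).Perm
      (d.items.flatMap (fun p => p.2) ++ R) := by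
  induction R with
  | nil => intro d h1 h2; exact ⟨h1, h2, by simp⟩
  | cons i R ih =>
    intro d h1 h2
    obtain ⟨m1, m2, m3⟩ := pv_modify_step (g := g) d i h1 h2
    obtain ⟨f1, f2, f3⟩ := ih _ m1 m2
    refine ⟨f1, f2, ?_⟩
    simp only [List.foldl_cons]
    refine f3.trans ?_
    have h4 := List.Perm.append_right R m3
    refine h4.trans ?_
    have : (d.items.flatMap (fun p => p.2) ++ [i]) ++ R = d.items.flatMap (fun p => p.2) ++ (i :: R) := by
      simp
    rw [this]

theorem create_m_list_spec_aux (hash_table : List (String × List (Int × Int))) (query : String) (k : Int) :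
    create_m_list hash_table query k = create_m_list_alt hash_table query k := by
  unfold create_m_list create_m_list_alt
  set g : Int → String := fun i => PySem.Str.slice query (some i) (some (i + k)) with hgdef
  set d := PySem.Dict.mk hash_table with hddef
  set f : Int → (Int × Int) → Int × Int × Int := fun i pos => (pos.1, pos.2 - i, pos.2) with hfdef
  set R := PySem.List.pyRange 0 (PySem.Str.len query - k + 1) with hRdef
  set c : Int → List (Int × Int × Int) :=
    fun i => if d.contains (g i) then (d.getD (g i) []).map (f i) else [] with hcdef
  -- A's loop is R.flatMap c
  have hA : R.foldl (fun acc i => if d.contains (g i) then acc ++ (d.getD (g i) []).map (f i) else acc) ([] : List (Int × Int × Int)) = R.flatMap c := by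
    have := PySem.List.foldl_congr_mem
      (f := fun acc i => if d.contains (g i) then acc ++ (d.getD (g i) []).map (f i) else acc)
      (g := fun acc i => acc ++ c i) (l := R) (init := ([] : List (Int × Int × Int)))
      (by
        intro acc i _
        by_cases hci : d.contains (g i) = true
        · simp [hcdef, hci]
        · simp [hcdef, hci])
    rw [this, PySem.List.foldl_append_eq_flatMap, List.nil_append]
  -- the grouping dictionary
  have hG := pv_group_fold (g := g) R PySem.Dict.empty (by simp [PySem.Dict.empty]) (by simp [PySem.Dict.empty])
  obtain ⟨G1, G2, G3⟩ := hG
  have G3' : ((R.foldl (fun d i => d.modify (g i) [] (fun l => l ++ [i])) PySem.Dict.empty).items.flatMap (fun p => p.2)).Perm R := by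
    refine G3.trans ?_
    simp [PySem.Dict.empty]
  set groups := R.foldl (fun d i => d.modify (g i) [] (fun l => l ++ [i])) PySem.Dict.empty with hgroups
  -- B's join loop is a flatMap over the grouped items
  set t : (String × List Int) → List (Int × Int × Int) :=
    fun p => match d.get? p.1 with
      | some hits => hits.flatMap (fun pos => p.2.map (fun i => f i pos))
      | none => [] with htdef
  have hB : groups.items.foldl (fun acc p =>
      match d.get? p.1 with
      | some hits => acc ++ hits.flatMap (fun pos => p.2.map (fun i => f i pos))
      | none => acc) ([] : List (Int × Int × Int)) = groups.items.flatMap t := by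
    have := PySem.List.foldl_congr_mem
      (f := fun acc p =>
        match d.get? p.1 with
        | some hits => acc ++ hits.flatMap (fun pos => p.2.map (fun i => f i pos))
        | none => acc)
      (g := fun acc p => acc ++ t p) (l := groups.items) (init := ([] : List (Int × Int × Int)))
      (by
        intro acc p _
        rcases hh : d.get? p.1 with _ | hits <;> simp [htdef, hh])
    rw [this, PySem.List.foldl_append_eq_flatMap, List.nil_append]
  -- per group, the join term is a permutation of the per-position contributions
  have hT : ∀ p ∈ groups.items, (t p).Perm (p.2.flatMap c) := by
    intro p hp
    have hkey : ∀ i ∈ p.2, g i = p.1 := G2 p hp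
    rcases hh : d.get? p.1 with _ | hits
    · have : p.2.flatMap c = [] := by
        apply List.flatMap_eq_nil_iff.mpr
        intro i hi
        have hc : d.contains (g i) = false := by
          rw [pv_contains_eq_isSome, hkey i hi, hh]; rfl
        simp [hcdef, hc]
      rw [this]
      simp [htdef, hh]
    · have hflat : p.2.flatMap c = p.2.flatMap (fun i => hits.map (f i)) := by
        apply List.flatMap_congr
        intro i hi
        have hc : d.contains (g i) = true := by
          rw [pv_contains_eq_isSome, hkey i hi, hh]; rfl
        have hgd : d.getD (g i) [] = hits := by
          rw [PySem.Dict.getD, hkey i hi, hh]; rfl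
        simp [hcdef, hc, hgd]
      rw [hflat]
      have := pv_flatMap_swap_perm hits p.2 (fun pos i => f i pos)
      simpa [htdef, hh] using this
  -- chain it all together
  have hLB : (groups.items.flatMap t).Perm (R.flatMap c) := by
    have s1 : (groups.items.flatMap t).Perm (groups.items.flatMap (fun p => p.2.flatMap c)) :=
      List.Perm.flatMap (List.Perm.refl groups.items) hT
    have s2 : groups.items.flatMap (fun p => p.2.flatMap c) = (groups.items.flatMap (fun p => p.2)).flatMap c :=
      (List.flatMap_assoc).symm
    have s3 : ((groups.items.flatMap (fun p => p.2)).flatMap c).Perm (R.flatMap c) :=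
      List.Perm.flatMap G3' (fun a _ => List.Perm.refl (c a))
    exact s1.trans (s2 ▸ s3)
  have main : PySem.List.sorted (R.foldl (fun acc i => if d.contains (g i) then acc ++ (d.getD (g i) []).map (f i) else acc) ([] : List (Int × Int × Int))) pvLexKey =
      PySem.List.sorted (groups.items.foldl (fun acc p =>
        match d.get? p.1 with
        | some hits => acc ++ hits.flatMap (fun pos => p.2.map (fun i => f i pos))
        | none => acc) ([] : List (Int × Int × Int))) pvLexKey := by
    rw [hA, hB]
    exact PySem.List.eq_of_perm_of_pairwise_le_of_injective pvLexKey pvLexKey_injective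
      ((PySem.List.sorted_perm _ _ _).trans ((hLB.symm).trans (PySem.List.sorted_perm _ _ _).symm))
      (PySem.List.sorted_pairwise _ _) (PySem.List.sorted_pairwise _ _)
  exact main

-- ===== VERDICT (by name: the statement is the Claim_ definition above) =====
theorem create_m_list_spec : Claim_equal_create_m_list := by
  intro hash_table query k _
  unfold Spec_create_m_list
  exact create_m_list_spec_aux hash_table query k
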